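-- pv_equiv track=rewrite | github.com/aljinovic-ante/Introduction_to_Programming | Kolokvij Vježbe/2. Kolokvij Zima 2017-18 F.py | rastavi
-- ===== SOURCE A (Python) =====
-- def rastavi(string):
--     lst=[]
--     poc=-1
--     kraj=-1
--     for i in range (len(string)):
--         if string[i].isupper():
--             poc=i
--         elif string[i]==".":
--             kraj=i
--             lst.append(string[poc:kraj+1])
--     return lst
-- ===== SOURCE B (Python) =====
-- def rastavi(string):
--     # pass 1: table of the most recent uppercase index at or before each position
--     last_upper = []
--     last = -1
--     for i, c in enumerate(string):
--         if c.isupper():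
--             last = i
--         last_upper.append(last)
--     # pass 2: on each period, slice from the recorded uppercase index
--     res = []
--     for (i, c), last in zip(enumerate(string), last_upper):
--         if c == '.':
--             res.append(string[last:i + 1])
--     return res
-- ===== Notes on version B (the rewrite author's own statement) =====
-- stated objective: alternative
-- what changed: A's single combined pass (tracking poc/kraj and appending slices inline) is replaced by a two-pass decomposition: first build a prefix table of the most recent uppercase index at each position (default -1, carried forward across periods), then scan it and emit string[last:i+1] at every period.
import Mathlib
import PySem

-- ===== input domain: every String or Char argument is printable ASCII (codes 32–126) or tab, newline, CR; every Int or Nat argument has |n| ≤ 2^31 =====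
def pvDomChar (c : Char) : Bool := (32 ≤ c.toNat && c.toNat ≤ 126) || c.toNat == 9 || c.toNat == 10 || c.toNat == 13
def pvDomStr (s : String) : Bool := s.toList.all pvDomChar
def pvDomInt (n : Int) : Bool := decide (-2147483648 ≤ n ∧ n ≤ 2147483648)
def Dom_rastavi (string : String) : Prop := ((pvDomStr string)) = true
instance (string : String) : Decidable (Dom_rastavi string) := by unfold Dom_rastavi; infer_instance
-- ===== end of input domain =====

-- B replaces A's single combined pass by a prefix table of last-uppercase indices built first,
-- then a scan appending a slice at each period (objective: alternative decomposition, same cost).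

-- ===== PORT A =====
def rastavi (string : String) : List String :=
  ((PySem.List.enumerate string.toList 0).foldl
    (fun (acc : List String × Int × Int) ic =>
      if PySem.Chars.isupper ic.2 then (acc.1, ic.1, acc.2.2)
      else if ic.2 = '.' then
        (acc.1 ++ [PySem.Str.slice string (some acc.2.1) (some (ic.1 + 1))], acc.2.1, ic.1)
      else acc)
    ([], -1, -1)).1

-- ===== PORT B =====
-- pass 1 of Source B: the last-uppercase prefix table
def rastaviTable (string : String) : List Int :=
  ((PySem.List.enumerate string.toList 0).foldl
    (fun (acc : List Int × Int) ic =>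
      let last := if PySem.Chars.isupper ic.2 then ic.1 else acc.2
      (acc.1 ++ [last], last))
    ([], -1)).1

-- pass 2 of Source B: scan zip(enumerate(string), last_upper), slicing at periods
def rastavi_alt (string : String) : List String :=
  ((PySem.List.enumerate string.toList 0).zip (rastaviTable string)).foldl
    (fun acc p =>
      if p.1.2 = '.' then acc ++ [PySem.Str.slice string (some p.2) (some (p.1.1 + 1))] else acc)
    []

-- ===== PRECONDITION & SPEC =====
def Spec_rastavi (string : String) (out : List String) : Prop := out = rastavi_alt string
instance (string : String) (out : List String) : Decidable (Spec_rastavi string out) := by unfold Spec_rastavi; infer_instance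

-- ===== CLAIM (what is proved, stated in full; the proofs are below) =====
def Claim_equal_rastavi : Prop := ∀ (string : String), Dom_rastavi string → Spec_rastavi string (rastavi string)

-- ===== LEMMAS AND PROOFS =====

-- common characterization: the slices both programs emit, scanning cs at offset k with last-upper index poc
def pvSpec (s : String) : List Char → Int → Int → List String
  | [], _, _ => []
  | c :: cs, k, poc =>
    if PySem.Chars.isupper c then pvSpec s cs (k + 1) k
    else if c = '.' then PySem.Str.slice s (some poc) (some (k + 1)) :: pvSpec s cs (k + 1) poc
    else pvSpec s cs (k + 1) poc

-- the prefix table B builds, scanning cs at offset k with carried last value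
def pvTbl : List Char → Int → Int → List Int
  | [], _, _ => []
  | c :: cs, k, last =>
    let l := if PySem.Chars.isupper c then k else last
    l :: pvTbl cs (k + 1) l

theorem pvA_fold (s : String) (cs : List Char) :
    ∀ (k : Int) (lst : List String) (poc kraj : Int),
    ((PySem.List.enumerate cs k).foldl
      (fun (acc : List String × Int × Int) ic =>
        if PySem.Chars.isupper ic.2 then (acc.1, ic.1, acc.2.2)
        else if ic.2 = '.' then
          (acc.1 ++ [PySem.Str.slice s (some acc.2.1) (some (ic.1 + 1))], acc.2.1, ic.1)
        else acc)
      (lst, poc, kraj)).1 = lst ++ pvSpec s cs k poc := by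
  induction cs with
  | nil => intro k lst poc kraj; simp [PySem.List.enumerate_nil, pvSpec]
  | cons c cs ih =>
    intro k lst poc kraj
    rw [PySem.List.enumerate_cons]
    simp only [List.foldl_cons, pvSpec]
    by_cases hu : PySem.Chars.isupper c
    · simp [hu, ih]
    · by_cases hd : c = '.'
      · subst hd; simp [hu, ih]
      · simp [hu, hd, ih]

theorem pvTbl_fold (cs : List Char) :
    ∀ (k : Int) (acc : List Int) (last : Int),
    ((PySem.List.enumerate cs k).foldl
      (fun (acc : List Int × Int) ic =>
        let l := if PySem.Chars.isupper ic.2 then ic.1 else acc.2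
        (acc.1 ++ [l], l))
      (acc, last)).1 = acc ++ pvTbl cs k last := by
  induction cs with
  | nil => intro k acc last; simp [PySem.List.enumerate_nil, pvTbl]
  | cons c cs ih =>
    intro k acc last
    rw [PySem.List.enumerate_cons]
    simp only [List.foldl_cons, pvTbl]
    rw [ih]
    simp

theorem pv_isupper_ne_dot (c : Char) (h : PySem.Chars.isupper c = true) : (c = '.') = false := by
  by_cases hc : c = '.'
  · subst hc; simp [PySem.Chars.isupper] at h
  · simp [hc]

theorem pvB_fold (s : String) (cs : List Char) :
    ∀ (k : Int) (acc : List String) (poc : Int),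
    ((PySem.List.enumerate cs k).zip (pvTbl cs k poc)).foldl
      (fun acc p =>
        if p.1.2 = '.' then acc ++ [PySem.Str.slice s (some p.2) (some (p.1.1 + 1))] else acc)
      acc = acc ++ pvSpec s cs k poc := by
  induction cs with
  | nil => intro k acc poc; simp [PySem.List.enumerate_nil, pvSpec, pvTbl]
  | cons c cs ih =>
    intro k acc poc
    rw [PySem.List.enumerate_cons]
    simp only [pvTbl, pvSpec, List.zip_cons_cons, List.foldl_cons]
    by_cases hu : PySem.Chars.isupper c
    · simp [hu, pv_isupper_ne_dot c hu, ih]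
    · simp only [hu]
      by_cases hd : c = '.'
      · subst hd; simp [ih]
      · simp [hd, ih]

-- ===== VERDICT (by name: the statement is the Claim_ definition above) =====
theorem rastavi_spec : Claim_equal_rastavi := by
  intro s _
  show rastavi s = rastavi_alt s
  rw [rastavi, rastavi_alt, rastaviTable, pvA_fold, pvTbl_fold]
  simp only [List.nil_append]
  rw [pvB_fold]
  simp
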